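-- pv_equiv track=rewrite | github.com/Eon-Labs/rangebar | momentum_pattern_analyzer.py | _detect_consecutive_patterns
-- ===== SOURCE A (Python) =====
-- def _detect_consecutive_patterns(direction_series):
--     """Detect consecutive bullish/bearish patterns"""
--     consecutive = []
--     current_count = 0
--     last_direction = None
--
--     for direction in direction_series:
--         if direction == last_direction:
--             current_count += 1
--         else:
--             current_count = 1
--             last_direction = direction
--
--         consecutive.append(current_count * direction)
--
--     return consecutive
-- ===== SOURCE B (Python) =====
-- def _detect_consecutive_patterns(direction_series):
--     """Detect consecutive bullish/bearish patterns (run-splitting two-pointer version)"""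
--     xs = list(direction_series)
--     out = []
--     i, n = 0, len(xs)
--     while i < n:
--         j = i + 1
--         while j < n and xs[j] == xs[i]:
--             j += 1
--         d = xs[i]
--         for k in range(j - i):
--             out.append((k + 1) * d)
--         i = j
--     return out
-- ===== Notes on version B (the rewrite author's own statement) =====
-- stated objective: alternative
-- what changed: Replaces the running last_direction/current_count state machine with a two-pointer run-splitting scan: each maximal run of equal directions is located first, then 1*d..len*d is emitted for that run in one inner range loop.
import Mathlib
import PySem

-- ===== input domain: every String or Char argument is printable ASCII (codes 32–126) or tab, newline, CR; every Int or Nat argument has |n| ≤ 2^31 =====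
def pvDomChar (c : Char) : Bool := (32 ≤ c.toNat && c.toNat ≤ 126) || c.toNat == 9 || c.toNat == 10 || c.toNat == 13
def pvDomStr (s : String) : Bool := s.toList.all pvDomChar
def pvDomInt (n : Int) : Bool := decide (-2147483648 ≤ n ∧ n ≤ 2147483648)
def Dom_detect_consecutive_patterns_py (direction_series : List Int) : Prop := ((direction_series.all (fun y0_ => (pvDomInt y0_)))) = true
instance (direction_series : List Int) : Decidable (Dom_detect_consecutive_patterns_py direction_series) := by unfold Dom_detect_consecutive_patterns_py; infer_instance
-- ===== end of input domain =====

-- B replaces A's running last_direction/current_count state machine by a two-pointer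
-- run-splitting scan (alternative decomposition, same O(n) cost).

-- ===== PORT A =====
-- the for-loop of A with its state (last_direction, current_count); each iteration
-- appends current_count * direction, here as the obvious structural recursion
def pvAGo (last : Option Int) (cnt : Int) : List Int → List Int
  | [] => []
  | d :: ds =>
    if some d == last then ((cnt + 1) * d) :: pvAGo last (cnt + 1) ds
    else (1 * d) :: pvAGo (some d) 1 ds

def detect_consecutive_patterns_py (direction_series : List Int) : List Int :=
  pvAGo none 0 direction_series

-- ===== PORT B =====
-- inner while loop of Source B: length of the maximal prefix of xs equal to d
def pvCountRun (d : Int) : List Int → Nat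
  | [] => 0
  | x :: xs => if x = d then pvCountRun d xs + 1 else 0

-- outer while loop of Source B: emit (k+1)*d for k in range(run length), advance past the run
def pvBGo (l : List Int) : List Int :=
  match l with
  | [] => []
  | x :: xs =>
    ((List.range (pvCountRun x xs + 1)).map fun (k : Nat) => ((k : Int) + 1) * x)
      ++ pvBGo (xs.drop (pvCountRun x xs))
termination_by l.length
decreasing_by simp

def detect_consecutive_patterns_py_alt (direction_series : List Int) : List Int :=
  pvBGo direction_series

-- ===== PRECONDITION & SPEC =====
def Spec_detect_consecutive_patterns_py (direction_series : List Int) (out : List Int) : Prop := out = detect_consecutive_patterns_py_alt direction_series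
instance (direction_series : List Int) (out : List Int) : Decidable (Spec_detect_consecutive_patterns_py direction_series out) := by unfold Spec_detect_consecutive_patterns_py; infer_instance

-- ===== CLAIM (what is proved, stated in full; the proofs are below) =====
def Claim_equal_detect_consecutive_patterns_py : Prop := ∀ (direction_series : List Int), Dom_detect_consecutive_patterns_py direction_series → Spec_detect_consecutive_patterns_py direction_series (detect_consecutive_patterns_py direction_series)

-- ===== LEMMAS AND PROOFS =====

-- peel the first element off a map over List.range with the Nat→Int cast inside
theorem map_range_succ_cast (f : Int → Int) (n : Nat) :
    (List.range (n + 1)).map (fun (k : Nat) => f (k : Int)) =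
      f 0 :: (List.range n).map (fun (k : Nat) => f ((k : Int) + 1)) := by
  rw [List.range_succ_eq_map, List.map_cons, List.map_map]
  refine List.cons_eq_cons.mpr ⟨rfl, ?_⟩
  apply List.map_congr_left
  intro k _
  simp only [Function.comp]
  push_cast
  rfl

-- inside a run of d's started with count c, A emits (c+1)*d, (c+2)*d, … and then
-- restarts (fresh state none/0 behaves like the else-branch state) on the rest
theorem pvAGo_run (xs : List Int) : ∀ (d c : Int),
    pvAGo (some d) c xs =
      ((List.range (pvCountRun d xs)).map fun (k : Nat) => (c + 1 + (k : Int)) * d)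
        ++ pvAGo none 0 (xs.drop (pvCountRun d xs)) := by
  induction xs with
  | nil => intro d c; simp [pvAGo, pvCountRun]
  | cons y ys ih =>
    intro d c
    by_cases h : y = d
    · subst h
      have hr : pvCountRun y (y :: ys) = pvCountRun y ys + 1 := by simp [pvCountRun]
      rw [hr]
      rw [show pvAGo (some y) c (y :: ys) = (c + 1) * y :: pvAGo (some y) (c + 1) ys from by
        simp [pvAGo]]
      rw [map_range_succ_cast (fun t => (c + 1 + t) * y), List.drop_succ_cons,
        List.cons_append, ih y (c + 1)]
      refine List.cons_eq_cons.mpr ⟨by ring_nf, ?_⟩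
      congr 1
      apply List.map_congr_left
      intro k _
      ring
    · have hb : (some y == some d) = false := by simp [h]
      have hr : pvCountRun d (y :: ys) = 0 := by simp [pvCountRun, h]
      rw [hr]
      simp [pvAGo, hb]

theorem pvAGo_eq_pvBGo (l : List Int) : pvAGo none 0 l = pvBGo l := by
  induction hn : l.length using Nat.strong_induction_on generalizing l with
  | _ n ih =>
  match l, hn with
  | [], _ => simp [pvAGo, pvBGo]
  | x :: xs, hn =>
    have ihr : pvAGo none 0 (xs.drop (pvCountRun x xs)) = pvBGo (xs.drop (pvCountRun x xs)) := by
      apply ih (xs.drop (pvCountRun x xs)).length _ _ rfl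
      simp at hn ⊢; omega
    rw [pvBGo]
    rw [show pvAGo none 0 (x :: xs) = 1 * x :: pvAGo (some x) 1 xs from by simp [pvAGo]]
    rw [pvAGo_run xs x 1, ihr]
    rw [map_range_succ_cast (fun t => (t + 1) * x), List.cons_append]
    refine List.cons_eq_cons.mpr ⟨by ring, ?_⟩
    congr 1
    apply List.map_congr_left
    intro k _
    ring

-- ===== VERDICT (by name: the statement is the Claim_ definition above) =====
theorem detect_consecutive_patterns_py_spec : Claim_equal_detect_consecutive_patterns_py := by
  intro ds _
  unfold Spec_detect_consecutive_patterns_py detect_consecutive_patterns_py detect_consecutive_patterns_py_alt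
  exact pvAGo_eq_pvBGo ds
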